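-- pv_equiv track=rewrite | github.com/UNI-FIIS-BIC01/solucion-cuarto-laboratorio | escrabol.py | palabra_valida_sin_comodin
-- ===== SOURCE A (Python) =====
-- def convertir_palabra_a_diccionario(palabra):
--     """
--
--     :param palabra: La cadena de caracteres correspondiente a una palabra.
--     :return: Un diccionario. Las claves son las letras de palabra, y los valores el numero de ocurrencias de cada letra.
--     """
--     diccionario = {}
--     for letra in palabra:
--         diccionario[letra] = diccionario.get(letra, 0) + 1
--     return diccionario
--
-- def palabra_valida_sin_comodin(palabra, diccionario_letras, listado_palabras):
--     en_lista = palabra in listado_palabras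
--
--     if en_lista:
--         diccionario_palabra = convertir_palabra_a_diccionario(palabra)
--
--         for letra in diccionario_palabra:
--             letra_presente = letra in diccionario_letras.keys()
--             faltan_letras = letra_presente and diccionario_letras[letra] < diccionario_palabra[letra]
--             if (not letra_presente) or faltan_letras:
--                 return False
--
--         return True
--
--     return False
-- ===== SOURCE B (Python) =====
-- def palabra_valida_sin_comodin(palabra, diccionario_letras, listado_palabras):
--     if palabra not in listado_palabras:
--         return False
--     restante = dict(diccionario_letras)
--     for letra in palabra:
--         if restante.get(letra, 0) <= 0:
--             return False
--         restante[letra] -= 1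
--     return True
-- ===== Notes on version B (the rewrite author's own statement) =====
-- stated objective: simpler
-- what changed: Replaces the build-a-count-dict-then-compare-per-distinct-letter pass with a single left-to-right pass that consumes letters from a copy of the pool, failing as soon as a letter's remaining count is non-positive; the helper convertir_palabra_a_diccionario disappears.
import Mathlib
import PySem

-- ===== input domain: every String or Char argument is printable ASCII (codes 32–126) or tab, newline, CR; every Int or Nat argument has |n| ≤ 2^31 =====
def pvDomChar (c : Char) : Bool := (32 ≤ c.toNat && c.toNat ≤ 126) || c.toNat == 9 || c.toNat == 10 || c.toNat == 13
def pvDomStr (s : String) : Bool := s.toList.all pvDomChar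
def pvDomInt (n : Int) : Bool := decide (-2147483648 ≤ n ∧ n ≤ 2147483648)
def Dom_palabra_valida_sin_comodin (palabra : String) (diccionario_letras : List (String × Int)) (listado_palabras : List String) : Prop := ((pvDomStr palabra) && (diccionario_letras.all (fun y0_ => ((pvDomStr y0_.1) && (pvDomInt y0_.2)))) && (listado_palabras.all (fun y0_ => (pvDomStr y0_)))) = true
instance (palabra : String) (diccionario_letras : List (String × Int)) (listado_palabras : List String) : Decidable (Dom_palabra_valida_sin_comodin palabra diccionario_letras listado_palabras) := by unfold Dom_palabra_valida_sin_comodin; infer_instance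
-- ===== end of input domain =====

-- B drops the count-dict helper and the per-distinct-letter comparison, consuming letters
-- from a copy of the pool in one left-to-right pass (objective: simpler).

-- ===== PORT A =====
def convertir_palabra_a_diccionario (palabra : String) : PySem.Dict String Int :=
  palabra.toList.foldl
    (fun d letra => d.insert letra.toString (d.getD letra.toString 0 + 1))
    PySem.Dict.empty

-- the 'for letra in diccionario_palabra:' loop with its early 'return False'
def pvsLoopA (dp dl : PySem.Dict String Int) : List String → Bool
  | [] => true
  | letra :: rest =>
      let letra_presente := dl.contains letra
      let faltan_letras := letra_presente && decide (dl.getD letra 0 < dp.getD letra 0)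
      if !letra_presente || faltan_letras then false else pvsLoopA dp dl rest

def palabra_valida_sin_comodin (palabra : String) (diccionario_letras : List (String × Int)) (listado_palabras : List String) : Bool :=
  let en_lista := listado_palabras.contains palabra
  if en_lista then
    let diccionario_palabra := convertir_palabra_a_diccionario palabra
    pvsLoopA diccionario_palabra (PySem.Dict.ofList diccionario_letras) diccionario_palabra.keys
  else
    false

-- ===== PORT B =====
-- the 'for letra in palabra:' loop consuming from 'restante'
def pvsConsume : List Char → PySem.Dict String Int → Bool
  | [], _ => true
  | letra :: rest, restante =>
      if restante.getD letra.toString 0 ≤ 0 then false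
      else pvsConsume rest (restante.modify letra.toString 0 (· - 1))

def palabra_valida_sin_comodin_alt (palabra : String) (diccionario_letras : List (String × Int)) (listado_palabras : List String) : Bool :=
  if !(listado_palabras.contains palabra) then false
  else pvsConsume palabra.toList (PySem.Dict.ofList diccionario_letras)

-- ===== PRECONDITION & SPEC =====
def Spec_palabra_valida_sin_comodin (palabra : String) (diccionario_letras : List (String × Int)) (listado_palabras : List String) (out : Bool) : Prop := out = palabra_valida_sin_comodin_alt palabra diccionario_letras listado_palabras
instance (palabra : String) (diccionario_letras : List (String × Int)) (listado_palabras : List String) (out : Bool) : Decidable (Spec_palabra_valida_sin_comodin palabra diccionario_letras listado_palabras out) := by unfold Spec_palabra_valida_sin_comodin; infer_instance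

-- ===== CLAIM (what is proved, stated in full; the proofs are below) =====
def Claim_equal_palabra_valida_sin_comodin : Prop := ∀ (palabra : String) (diccionario_letras : List (String × Int)) (listado_palabras : List String), Dom_palabra_valida_sin_comodin palabra diccionario_letras listado_palabras → Spec_palabra_valida_sin_comodin palabra diccionario_letras listado_palabras (palabra_valida_sin_comodin palabra diccionario_letras listado_palabras)

-- ===== LEMMAS AND PROOFS =====

theorem charToString_injective : Function.Injective Char.toString := by
  intro a b h
  simpa using congrArg String.toList h

-- characterization of A's loop
theorem pvsLoopA_eq_true_iff (dp dl : PySem.Dict String Int) (ks : List String) :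
    pvsLoopA dp dl ks = true ↔
      ∀ k ∈ ks, dl.contains k = true ∧ ¬ (dl.getD k 0 < dp.getD k 0) := by
  induction ks with
  | nil => simp [pvsLoopA]
  | cons k rest ih =>
      simp only [pvsLoopA]
      by_cases hc : dl.contains k = true
      · by_cases hlt : dl.getD k 0 < dp.getD k 0
        · simp [hc, hlt]
        · have hcond : (!dl.contains k || (dl.contains k && decide (dl.getD k 0 < dp.getD k 0))) = false := by
            simp [hc, hlt]
          simp only [hcond, Bool.false_eq_true, if_false, ih]
          constructor
          · intro h x hx
            rcases List.mem_cons.mp hx with rfl | hxr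
            · exact ⟨hc, hlt⟩
            · exact h x hxr
          · intro h x hx
            exact h x (List.mem_cons_of_mem _ hx)
      · have hcf : dl.contains k = false := by
          cases h' : dl.contains k
          · rfl
          · exact absurd h' hc
        constructor
        · intro h
          rw [hcf] at h
          simp at h
        · intro h
          exact absurd (h k List.mem_cons_self).1 hc

-- characterization of B's loop
theorem pvsConsume_eq_true_iff (cs : List Char) (d : PySem.Dict String Int) :
    pvsConsume cs d = true ↔
      ∀ c ∈ cs, (cs.count c : Int) ≤ d.getD c.toString 0 := by
  induction cs generalizing d with
  | nil => simp [pvsConsume]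
  | cons c rest ih =>
      simp only [pvsConsume]
      by_cases h0 : d.getD c.toString 0 ≤ 0
      · simp only [h0, if_pos]
        constructor
        · intro h; exact absurd h (by simp)
        · intro h
          have hc := h c (List.mem_cons_self)
          have : (1 : Int) ≤ ((c :: rest).count c : Int) := by
            have := List.count_pos_iff.mpr (List.mem_cons_self (a := c) (l := rest))
            exact_mod_cast this
          omega
      · push Not at h0
        simp only [if_neg (by omega : ¬ d.getD c.toString 0 ≤ 0)]
        rw [ih]
        constructor
        · intro h x hx
          rcases List.mem_cons.mp hx with hxc | hxr
          · subst hxc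
            by_cases hm : x ∈ rest
            · have := h x hm
              rw [PySem.Dict.getD_modify_self] at this
              have hcount : (x :: rest).count x = rest.count x + 1 := by
                simp
              rw [hcount]; push_cast; omega
            · have hcount : (x :: rest).count x = 1 := by
                simp [List.count_eq_zero_of_not_mem hm]
              rw [hcount]; omega
          · by_cases hxc : x = c
            · subst hxc
              have := h x hxr
              rw [PySem.Dict.getD_modify_self] at this
              have hcount : (x :: rest).count x = rest.count x + 1 := by
                simp
              rw [hcount]; push_cast; omega
            · have := h x hxr
              rw [PySem.Dict.getD_modify_of_ne _ 0 _ (fun he => hxc (charToString_injective he))] at this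
              have hcount : (c :: rest).count x = rest.count x := by
                simp [show ¬ c = x from fun he => hxc he.symm]
              rw [hcount]; exact this
        · intro h x hx
          by_cases hxc : x = c
          · subst hxc
            have := h x (List.mem_cons_self)
            rw [PySem.Dict.getD_modify_self]
            have hcount : (x :: rest).count x = rest.count x + 1 := by
              simp
            rw [hcount] at this; push_cast at this ⊢; omega
          · have := h x (List.mem_cons_of_mem _ hx)
            rw [PySem.Dict.getD_modify_of_ne _ 0 _ (fun he => hxc (charToString_injective he))]
            have hcount : (c :: rest).count x = rest.count x := by
              simp [show ¬ c = x from fun he => hxc he.symm]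
            rw [hcount] at this; exact this

-- the count dict built by A: lookups and keys
theorem getD_convertir (palabra : String) (s : String) :
    (convertir_palabra_a_diccionario palabra).getD s 0
      = ((palabra.toList.map Char.toString).count s : Int) := by
  have h : convertir_palabra_a_diccionario palabra
      = (palabra.toList.map Char.toString).foldl
          (fun d x => d.insert x (d.getD x 0 + 1)) PySem.Dict.empty := by
    unfold convertir_palabra_a_diccionario
    rw [List.foldl_map]
  rw [h, PySem.Dict.getD_foldl_insert_add_one]
  simp

theorem keys_convertir (palabra : String) :
    (convertir_palabra_a_diccionario palabra).keys
      = PySem.Set.ofList (palabra.toList.map Char.toString) := by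
  have h : convertir_palabra_a_diccionario palabra
      = (palabra.toList.map Char.toString).foldl
          (fun d x => d.insert x (d.getD x 0 + 1)) PySem.Dict.empty := by
    unfold convertir_palabra_a_diccionario
    rw [List.foldl_map]
  rw [h, PySem.Dict.keys_foldl_insert]
  simp [PySem.Set.update_nil_left]

theorem contains_of_getD_pos (d : PySem.Dict String Int) (k : String)
    (h : 0 < d.getD k 0) : d.contains k = true := by
  cases hc : d.contains k with
  | true => rfl
  | false =>
      rw [PySem.Dict.getD_of_not_contains d 0 hc] at h
      omega

-- ===== VERDICT (by name: the statement is the Claim_ definition above) =====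
theorem palabra_valida_sin_comodin_spec : Claim_equal_palabra_valida_sin_comodin := by
  unfold Claim_equal_palabra_valida_sin_comodin
  intro palabra dl lst _
  unfold Spec_palabra_valida_sin_comodin
  unfold palabra_valida_sin_comodin palabra_valida_sin_comodin_alt
  cases hin : lst.contains palabra with
  | false => simp
  | true =>
    simp only [Bool.not_true, if_pos, Bool.false_eq_true, if_false]
    rw [Bool.eq_iff_iff, pvsLoopA_eq_true_iff, pvsConsume_eq_true_iff, keys_convertir]
    constructor
    · intro h c hc
      have hk : c.toString ∈ PySem.Set.ofList (palabra.toList.map Char.toString) := by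
        rw [PySem.Set.mem_ofList]; exact List.mem_map_of_mem hc
      have := (h _ hk).2
      rw [getD_convertir] at this
      rw [List.count_map_of_injective _ _ charToString_injective] at this
      omega
    · intro h k hk
      rw [PySem.Set.mem_ofList] at hk
      obtain ⟨c, hc, rfl⟩ := List.mem_map.mp hk
      have hb := h c hc
      have hpos : (0 : Int) < palabra.toList.count c := by
        have := List.count_pos_iff.mpr hc; exact_mod_cast this
      refine ⟨contains_of_getD_pos _ _ (by omega), ?_⟩
      rw [getD_convertir, List.count_map_of_injective _ _ charToString_injective]
      omega
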